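-- pv_equiv track=rewrite | github.com/CodingCraftChannel/meta-puzzles | kaitenzushi/level_1.py | getMaximumEatenDishCount
-- ===== SOURCE A (Python) =====
-- from typing import List
-- import queue
--
-- def getMaximumEatenDishCount(N: int, D: List[int], K: int) -> int:
--   eaten_set = set()
--   eaten_list = queue.Queue()
--   count = 0
--
--   for i in range(N):
--     if D[i] not in eaten_set:
--       count += 1
--       eaten_set.add(D[i])
--       eaten_list.put(D[i])
--
--       if len(eaten_set) > K:
--         eaten_set.remove(eaten_list.get())
--
--   return count
-- ===== SOURCE B (Python) =====
-- from typing import List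
--
-- def getMaximumEatenDishCount(N: int, D: List[int], K: int) -> int:
--   # Single dict of last-eaten indices instead of set + FIFO queue:
--   # dish d is edible iff never eaten, or at least K dishes eaten since its last eat.
--   last_eaten = {}
--   count = 0
--   for i in range(N):
--     d = D[i]
--     if d not in last_eaten or count - last_eaten[d] >= K:
--       count += 1
--       last_eaten[d] = count
--   return count
-- ===== Notes on version B (the rewrite author's own statement) =====
-- stated objective: simpler
-- what changed: Replaces the set + FIFO eviction queue with a single dict of last-eaten order indices: a dish is eaten iff unseen or count - last_eaten[d] >= K, so no explicit window maintenance, queue locking or eviction is needed.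
import Mathlib
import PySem

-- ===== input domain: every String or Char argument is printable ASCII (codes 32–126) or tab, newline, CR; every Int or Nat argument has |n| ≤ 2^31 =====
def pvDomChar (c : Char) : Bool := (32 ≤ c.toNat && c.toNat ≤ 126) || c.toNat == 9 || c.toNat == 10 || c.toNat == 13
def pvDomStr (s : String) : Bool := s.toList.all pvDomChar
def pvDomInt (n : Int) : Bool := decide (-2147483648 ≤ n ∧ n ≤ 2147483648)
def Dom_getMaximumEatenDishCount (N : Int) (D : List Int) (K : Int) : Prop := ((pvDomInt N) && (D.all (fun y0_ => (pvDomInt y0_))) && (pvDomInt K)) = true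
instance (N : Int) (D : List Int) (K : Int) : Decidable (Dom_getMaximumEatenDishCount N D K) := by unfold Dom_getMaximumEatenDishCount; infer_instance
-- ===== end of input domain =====

-- B replaces A's set + FIFO eviction queue by a single dict of last-eaten order
-- indices compared arithmetically against K (objective: simpler; return value only).

-- ===== PORT A =====
-- one iteration of A's loop body, on the dish value d; state = (eaten_set, eaten_list, count)
def pvStepA (K : Int) (st : PySem.Set Int × List Int × Int) (d : Int) :
    PySem.Set Int × List Int × Int :=
  if !(PySem.Set.contains st.1 d) then
    let count := st.2.2 + 1
    let s := PySem.Set.add st.1 d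
    let q := st.2.1 ++ [d]
    if K < PySem.Set.len s then
      match q with
      | [] => (s, [], count)                       -- unreachable: q was just appended to
      | h :: t => (PySem.Set.discard s h, t, count) -- h is in s, so set.remove == discard
    else (s, q, count)
  else st

def getMaximumEatenDishCount (N : Int) (D : List Int) (K : Int) : Int :=
  ((PySem.List.pyRange 0 N 1).foldl
    (fun st i => pvStepA K st (PySem.List.pyGetD D i 0)) ([], [], 0)).2.2

-- ===== PORT B =====
-- one iteration of B's loop body; state = (last_eaten, count)
def pvStepB (K : Int) (st : PySem.Dict Int Int × Int) (d : Int) : PySem.Dict Int Int × Int :=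
  match st.1.get? d with
  | none => (st.1.insert d (st.2 + 1), st.2 + 1)
  | some j => if st.2 - j ≥ K then (st.1.insert d (st.2 + 1), st.2 + 1) else st

def getMaximumEatenDishCount_alt (N : Int) (D : List Int) (K : Int) : Int :=
  ((PySem.List.pyRange 0 N 1).foldl
    (fun st i => pvStepB K st (PySem.List.pyGetD D i 0)) (PySem.Dict.empty, 0)).2

-- ===== PRECONDITION & SPEC =====
-- A indexes D[i] for i in range(N): it raises IndexError iff N > len(D); Pre_ excludes exactly that.
def Pre_getMaximumEatenDishCount (N : Int) (D : List Int) (K : Int) : Prop :=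
  N ≤ (D.length : Int)
instance (N : Int) (D : List Int) (K : Int) : Decidable (Pre_getMaximumEatenDishCount N D K) := by
  unfold Pre_getMaximumEatenDishCount; infer_instance

def pvWitness_getMaximumEatenDishCount : Int × List Int × Int := (3, [1, 2, 1], 2)

def Spec_getMaximumEatenDishCount (N : Int) (D : List Int) (K : Int) (out : Int) : Prop :=
  out = getMaximumEatenDishCount_alt N D K
instance (N : Int) (D : List Int) (K : Int) (out : Int) : Decidable (Spec_getMaximumEatenDishCount N D K out) := by
  unfold Spec_getMaximumEatenDishCount; infer_instance

-- ===== CLAIM (what is proved, stated in full; the proofs are below) =====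
def Claim_equal_getMaximumEatenDishCount : Prop :=
  ∀ (N : Int) (D : List Int) (K : Int), Dom_getMaximumEatenDishCount N D K →
    Pre_getMaximumEatenDishCount N D K →
    Spec_getMaximumEatenDishCount N D K (getMaximumEatenDishCount N D K)

-- ===== LEMMAS AND PROOFS =====

-- The coupling invariant between A's queue q (= its set, as a list) and B's dict t
-- after c dishes have been eaten: q holds the dishes eaten at orders c-|q|+1 .. c,
-- in order; dict entries are in [1, c]; dishes outside q were last eaten ≤ c-|q|.
def pvInv (K : Int) (q : List Int) (t : PySem.Dict Int Int) (c : Int) : Prop :=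
  0 ≤ c ∧
  (q.length : Int) = min c (max K 0) ∧
  q.map (fun d => t.getD d 0) = PySem.List.pyRange (c - q.length + 1) (c + 1) 1 ∧
  (∀ d j, t.get? d = some j → 1 ≤ j ∧ j ≤ c) ∧
  (∀ d, d ∉ q → ∀ j, t.get? d = some j → j ≤ c - q.length)

lemma pvInv_get_of_mem (K : Int) (q : List Int) (t : PySem.Dict Int Int) (c : Int)
    (h : pvInv K q t c) (d : Int) (hd : d ∈ q) :
    t.get? d = some (t.getD d 0) ∧ c - q.length + 1 ≤ t.getD d 0 ∧ t.getD d 0 ≤ c := by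
  obtain ⟨hc, hlen, hmap, hbd, hout⟩ := h
  have hmem : t.getD d 0 ∈ PySem.List.pyRange (c - q.length + 1) (c + 1) 1 := by
    rw [← hmap]; exact List.mem_map_of_mem hd
  rw [PySem.List.mem_pyRange_one] at hmem
  have hmlec : (q.length : Int) ≤ c := by omega
  have hpos : 1 ≤ t.getD d 0 := by omega
  cases hg : t.get? d with
  | none =>
    have := PySem.Dict.getD_of_get?_eq_none t (0 : Int) hg
    omega
  | some j =>
    have := PySem.Dict.getD_of_get?_eq_some t (0 : Int) hg
    refine ⟨by simp [this], by omega, by omega⟩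

lemma pvInv_nodup (K : Int) (q : List Int) (t : PySem.Dict Int Int) (c : Int)
    (h : pvInv K q t c) : q.Nodup := by
  obtain ⟨-, -, hmap, -, -⟩ := h
  have : (q.map (fun d => t.getD d 0)).Nodup := by
    rw [hmap]; exact PySem.List.nodup_pyRange_one _ _
  exact this.of_map

lemma pvFilter_ne_of_not_mem (l : List Int) (x : Int) (hx : x ∉ l) :
    l.filter (fun y => !(y == x)) = l := by
  apply List.filter_eq_self.mpr
  intro y hy
  simp only [Bool.not_eq_eq_eq_not, Bool.not_true, beq_eq_false_iff_ne, ne_eq]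
  rintro rfl; exact hx hy

-- one synchronized step preserves the invariant (d is the dish value of the step)
lemma pvStep_inv (K d : Int) (q : List Int) (t : PySem.Dict Int Int) (c : Int)
    (h : pvInv K q t c) :
    ∃ q' t' c', pvStepA K (q, q, c) d = (q', q', c') ∧ pvStepB K (t, c) d = (t', c') ∧
      pvInv K q' t' c' := by
  have hnd := pvInv_nodup K q t c h
  obtain ⟨hc, hlen, hmap, hbd, hout⟩ := h
  by_cases hd : d ∈ q
  · -- dish is in the window: both sides skip
    have hA : pvStepA K (q, q, c) d = (q, q, c) := by
      have hct : PySem.Set.contains q d = true := (PySem.Set.contains_iff q d).mpr hd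
      have hb : (!(PySem.Set.contains q d)) = false := by rw [hct]; rfl
      simp only [pvStepA, hb, Bool.false_eq_true, if_false]
    obtain ⟨hg, hlo, hhi⟩ := pvInv_get_of_mem K q t c ⟨hc, hlen, hmap, hbd, hout⟩ d hd
    have hm1 : 1 ≤ (q.length : Int) := by
      have : q ≠ [] := List.ne_nil_of_mem hd
      have : 0 < q.length := List.length_pos_of_ne_nil this
      exact_mod_cast this
    have hB : pvStepB K (t, c) d = (t, c) := by
      have hcond : ¬ (c - t.getD d 0 ≥ K) := by omega
      simp [pvStepB, hg, hcond]
    exact ⟨q, t, c, hA, hB, hc, hlen, hmap, hbd, hout⟩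
  · -- dish is outside the window: both sides eat
    have hcontains : (!(PySem.Set.contains q d)) = true := by
      cases hcb : PySem.Set.contains q d
      · rfl
      · exact absurd ((PySem.Set.contains_iff q d).mp hcb) hd
    have hadd : PySem.Set.add q d = q ++ [d] := PySem.Set.add_of_not_mem hd
    -- B eats
    have hB : pvStepB K (t, c) d = (t.insert d (c + 1), c + 1) := by
      cases hg : t.get? d with
      | none => simp [pvStepB, hg]
      | some j =>
        have hj1 := (hbd d j hg).1
        have hjout := hout d hd j hg
        have : c - j ≥ K := by omega
        simp [pvStepB, hg, this]
    -- common facts about the new dict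
    have hbd' : ∀ d' j, (t.insert d (c + 1)).get? d' = some j → 1 ≤ j ∧ j ≤ c + 1 := by
      intro d' j hj
      rw [PySem.Dict.get?_insert] at hj
      split_ifs at hj with hdd
      · cases hj; omega
      · have := hbd d' j hj; omega
    have hmapq : ∀ (l : List Int), d ∉ l →
        l.map (fun x => (t.insert d (c + 1)).getD x 0) = l.map (fun x => t.getD x 0) := by
      intro l hl
      apply List.map_congr_left
      intro x hx
      exact PySem.Dict.getD_insert_of_ne t (c + 1) 0 (fun hxe => hl (hxe ▸ hx))
    by_cases hev : K < (q.length : Int) + 1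
    · -- A evicts the oldest dish after eating
      cases hq : q with
      | nil =>
        -- window size 0 (K ≤ 0): the freshly eaten dish is evicted at once
        subst hq
        have hA : pvStepA K (([] : List Int), ([] : List Int), c) d = ([], [], c + 1) := by
          have hlen1 : PySem.Set.len (PySem.Set.add ([] : List Int) d) = 1 := by
            simp [PySem.Set.len]
          simp only [pvStepA, hcontains, if_true, hadd]
          simp only [List.nil_append]
          rw [if_pos (by simpa using hev)]
          simp [PySem.Set.discard]
        refine ⟨[], t.insert d (c + 1), c + 1, hA, hB, by omega, ?_, ?_, hbd', ?_⟩
        · simp only [List.length_nil, Nat.cast_zero] at hlen ⊢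
          simp only [List.length_nil, Nat.cast_zero] at hev
          omega
        · simp [PySem.List.pyRange_one_eq_nil (by omega : c + 1 + 1 ≤ c + 1 + 1)]
        · intro d' _ j hj
          have := hbd' d' j hj
          simp only [List.length_nil, Nat.cast_zero]
          omega
      | cons hhead tq =>
        subst hq
        have hdh : d ≠ hhead := fun he => hd (he ▸ List.mem_cons_self ..)
        have hhtq : hhead ∉ tq := (List.nodup_cons.mp hnd).1
        have hdtq : d ∉ tq := fun hm => hd (List.mem_cons_of_mem _ hm)
        have hdisc : PySem.Set.discard (hhead :: (tq ++ [d])) hhead = tq ++ [d] := by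
          simp only [PySem.Set.discard, List.filter_cons]
          have h1 : (!(hhead == hhead)) = false := by simp
          rw [h1]
          simp only [Bool.false_eq_true, if_false]
          apply pvFilter_ne_of_not_mem
          simp [hhtq, Ne.symm hdh]
        have hA : pvStepA K ((hhead :: tq), (hhead :: tq), c) d = (tq ++ [d], tq ++ [d], c + 1) := by
          simp only [pvStepA, hcontains, if_true, hadd]
          rw [if_pos (by simp [PySem.Set.len]; simpa using hev)]
          simp [hdisc]
        set m : Int := ((hhead :: tq).length : Int) with hm
        have hm1 : 1 ≤ m := by simp [hm]
        -- head of the old window carries order index c - m + 1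
        have hmap' : t.getD hhead 0 :: tq.map (fun x => t.getD x 0) =
            PySem.List.pyRange (c - m + 1) (c + 1) 1 := by simpa [hm] using hmap
        rw [PySem.List.pyRange_one_cons (by omega : c - m + 1 < c + 1)] at hmap'
        obtain ⟨hhead_val, htq_map⟩ := List.cons_eq_cons.mp hmap'
        refine ⟨tq ++ [d], t.insert d (c + 1), c + 1, hA, hB, by omega, ?_, ?_, hbd', ?_⟩
        · -- window length is unchanged
          have hlen2 : (((tq ++ [d]).length : Nat) : Int) = m := by simp [hm]
          rw [hlen2]; omega
        · -- the order indices of the new window are c - m + 2 .. c + 1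
          rw [List.map_append, hmapq tq hdtq, htq_map]
          have : ((tq ++ [d]).length : Int) = m := by simp [hm]
          rw [this]
          simp only [List.map_cons, List.map_nil]
          rw [PySem.Dict.getD_insert_self,
            ← PySem.List.pyRange_one_succ_right (by omega : c - m + 1 + 1 ≤ c + 1)]
          congr 1
          omega
        · -- dishes outside the new window were last eaten ≤ (c+1) - m
          intro d' hd' j hj
          have hdd' : d' ≠ d := by intro he; exact hd' (he ▸ List.mem_append_right _ (by simp))
          rw [PySem.Dict.get?_insert, if_neg hdd'] at hj
          have hlen' : ((tq ++ [d]).length : Int) = m := by simp [hm]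
          rw [hlen']
          by_cases hdh' : d' = hhead
          · rw [hdh'] at hj
            obtain ⟨hg, -, -⟩ := pvInv_get_of_mem K (hhead :: tq) t c
              ⟨hc, hlen, hmap, hbd, hout⟩ hhead (List.mem_cons_self ..)
            rw [hg] at hj
            cases hj
            rw [hhead_val]; omega
          · have hd'q : d' ∉ hhead :: tq := by
              simp only [List.mem_cons, not_or]
              exact ⟨hdh', fun hm' => hd' (List.mem_append_left _ hm')⟩
            have := hout d' hd'q j hj
            simp only [hm] at this ⊢
            omega
    · -- no eviction: the window grows by one
      have hA : pvStepA K (q, q, c) d = (q ++ [d], q ++ [d], c + 1) := by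
        simp only [pvStepA, hcontains, if_true, hadd]
        rw [if_neg (by simp [PySem.Set.len]; simpa using hev)]
      refine ⟨q ++ [d], t.insert d (c + 1), c + 1, hA, hB, by omega, ?_, ?_, hbd', ?_⟩
      · simp only [List.length_append, List.length_cons, List.length_nil]
        push_cast; omega
      · rw [List.map_append, hmapq q hd, hmap]
        have : ((q ++ [d]).length : Int) = (q.length : Int) + 1 := by simp
        rw [this]
        simp only [List.map_cons, List.map_nil]
        rw [PySem.Dict.getD_insert_self,
          ← PySem.List.pyRange_one_succ_right (by omega : c - q.length + 1 ≤ c + 1)]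
        congr 1; omega
      · intro d' hd' j hj
        have hdd' : d' ≠ d := by intro he; exact hd' (he ▸ List.mem_append_right _ (by simp))
        rw [PySem.Dict.get?_insert, if_neg hdd'] at hj
        have hd'q : d' ∉ q := fun hm' => hd' (List.mem_append_left _ hm')
        have := hout d' hd'q j hj
        have : j ≤ c - q.length := this
        have hlen' : ((q ++ [d]).length : Int) = (q.length : Int) + 1 := by simp
        omega

-- synchronized folds over the same dish list stay coupled
lemma pvFold_inv (K : Int) (l : List Int) :
    ∀ (q : List Int) (t : PySem.Dict Int Int) (c : Int), pvInv K q t c →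
    ∃ q' t' c', l.foldl (pvStepA K) (q, q, c) = (q', q', c') ∧
      l.foldl (pvStepB K) (t, c) = (t', c') ∧ pvInv K q' t' c' := by
  induction l with
  | nil => intro q t c h; exact ⟨q, t, c, rfl, rfl, h⟩
  | cons d l ih =>
    intro q t c h
    obtain ⟨q1, t1, c1, hA1, hB1, h1⟩ := pvStep_inv K d q t c h
    obtain ⟨q', t', c', hA', hB', h'⟩ := ih q1 t1 c1 h1
    exact ⟨q', t', c', by simpa [List.foldl_cons, hA1] using hA',
      by simpa [List.foldl_cons, hB1] using hB', h'⟩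

lemma pvInv_init (K : Int) : pvInv K [] PySem.Dict.empty 0 := by
  refine ⟨le_refl 0, ?_, ?_, ?_, ?_⟩
  · simp
  · simp [PySem.List.pyRange_one_eq_nil (by omega : (1 : Int) ≤ 1)]
  · intro d j hj; simp [PySem.Dict.get?_empty] at hj
  · intro d _ j hj; simp [PySem.Dict.get?_empty] at hj

-- ===== VERDICT (by name: the statement is the Claim_ definition above) =====
theorem getMaximumEatenDishCount_spec : Claim_equal_getMaximumEatenDishCount := by
  intro N D K _ _
  unfold Spec_getMaximumEatenDishCount getMaximumEatenDishCount getMaximumEatenDishCount_alt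
  obtain ⟨q', t', c', hA, hB, -⟩ :=
    pvFold_inv K ((PySem.List.pyRange 0 N 1).map (fun i => PySem.List.pyGetD D i 0))
      [] PySem.Dict.empty 0 (pvInv_init K)
  rw [List.foldl_map] at hA hB
  rw [hA, hB]
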